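-- pv_equiv track=rewrite | github.com/Ohjinn/algo-py | programmers/hash/위장_2.py | solution
-- ===== SOURCE A (Python) =====
-- def solution(clothes):
--     answer = 1
--     dict = {}
--     for cloth in clothes:
--         if cloth[1] in dict.keys():
--             dict[cloth[1]].append(cloth[0])
--         else:
--             dict[cloth[1]] = [cloth[0]]
--
--     for value in dict.values():
--         answer *= len(value)
--
--     return answer - 1
-- ===== SOURCE B (Python) =====
-- def solution(clothes):
--     cats = sorted(c[1] for c in clothes)
--     answer = 1
--     run = 0
--     prev = None
--     for cat in cats:
--         if cat == prev:
--             run += 1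
--         else:
--             if run:
--                 answer *= run
--             run = 1
--             prev = cat
--     if run:
--         answer *= run
--     return answer - 1
-- ===== Notes on version B (the rewrite author's own statement) =====
-- stated objective: alternative
-- what changed: Replaces A's hash-dictionary scatter (build per-category name lists, then multiply their lengths) by a sort-then-scan: sort the category keys and make one linear pass multiplying the answer by each run length of equal adjacent keys.
import Mathlib
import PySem

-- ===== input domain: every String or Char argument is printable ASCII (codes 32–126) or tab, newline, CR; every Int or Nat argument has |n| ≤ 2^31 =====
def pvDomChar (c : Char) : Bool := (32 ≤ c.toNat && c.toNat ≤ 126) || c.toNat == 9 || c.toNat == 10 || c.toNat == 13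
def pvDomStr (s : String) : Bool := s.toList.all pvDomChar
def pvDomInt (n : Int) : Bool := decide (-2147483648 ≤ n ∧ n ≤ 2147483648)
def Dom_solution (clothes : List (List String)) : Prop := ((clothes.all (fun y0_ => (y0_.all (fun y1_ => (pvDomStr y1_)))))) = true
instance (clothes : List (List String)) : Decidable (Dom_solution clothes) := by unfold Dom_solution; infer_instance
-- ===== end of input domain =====

-- B replaces A's hash-dictionary scatter by a sort-then-scan: sort the category keys,
-- then one linear pass multiplying the answer by each run length of equal adjacent keys.

-- ===== PORT A =====
def solution (clothes : List (List String)) : Int :=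
  let d := clothes.foldl (fun d cloth =>
    if d.contains (PySem.List.pyGetD cloth 1 "") then
      -- dict[cloth[1]].append(cloth[0]) : the in-place append = overwrite with the appended list
      d.insert (PySem.List.pyGetD cloth 1 "")
        (d.getD (PySem.List.pyGetD cloth 1 "") [] ++ [PySem.List.pyGetD cloth 0 ""])
    else
      d.insert (PySem.List.pyGetD cloth 1 "") [PySem.List.pyGetD cloth 0 ""])
    PySem.Dict.empty
  let answer := d.values.foldl (fun a v => a * (v.length : Int)) 1
  answer - 1

-- ===== PORT B =====
def solution_alt (clothes : List (List String)) : Int :=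
  let cats := PySem.List.sorted (clothes.map (fun c => PySem.List.pyGetD c 1 "")) (fun x => x) false
  let s := cats.foldl (fun (s : Int × Int × Option String) cat =>
      if some cat == s.2.2 then (s.1, s.2.1 + 1, s.2.2)
      else ((if s.2.1 ≠ 0 then s.1 * s.2.1 else s.1), 1, some cat))
    (1, 0, none)
  (if s.2.1 ≠ 0 then s.1 * s.2.1 else s.1) - 1

-- ===== PRECONDITION & SPEC =====
-- Pre_ excludes exactly the inputs with a cloth of fewer than two entries: there cloth[1] raises IndexError in A (and in B).
def Pre_solution (clothes : List (List String)) : Prop := ∀ cloth ∈ clothes, 2 ≤ cloth.length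
instance (clothes : List (List String)) : Decidable (Pre_solution clothes) := by unfold Pre_solution; infer_instance
def pvWitness_solution : List (List String) := [["hat", "head"], ["cap", "head"]]
def Spec_solution (clothes : List (List String)) (out : Int) : Prop := out = solution_alt clothes
instance (clothes : List (List String)) (out : Int) : Decidable (Spec_solution clothes out) := by unfold Spec_solution; infer_instance

-- ===== CLAIM (what is proved, stated in full; the proofs are below) =====
def Claim_equal_solution : Prop := ∀ (clothes : List (List String)), Dom_solution clothes → Pre_solution clothes → Spec_solution clothes (solution clothes)

-- ===== LEMMAS AND PROOFS =====

------------------------------------------------------------------- A side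

-- dict[k] = f(dict.get(k, [])) as an insert
theorem pv_modify_eq_insert (d : PySem.Dict String (List String)) (k : String)
    (f : List String → List String) : d.modify k [] f = d.insert k (f (d.getD k [])) := rfl

-- A's loop body is the 'append to the group of cloth[1]' dict update
theorem pv_step_eq (d : PySem.Dict String (List String)) (c : List String) :
    (if d.contains (PySem.List.pyGetD c 1 "") then
      d.insert (PySem.List.pyGetD c 1 "")
        (d.getD (PySem.List.pyGetD c 1 "") [] ++ [PySem.List.pyGetD c 0 ""])
    else
      d.insert (PySem.List.pyGetD c 1 "") [PySem.List.pyGetD c 0 ""])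
    = d.modify (PySem.List.pyGetD c 1 "") [] (fun v => v ++ [PySem.List.pyGetD c 0 ""]) := by
  rw [pv_modify_eq_insert]
  by_cases h : d.contains (PySem.List.pyGetD c 1 "") = true
  · simp [h]
  · simp only [Bool.not_eq_true] at h
    simp [h, PySem.Dict.getD_of_not_contains d [] h]

-- A's dict-building loop, seen as a grouping loop over (category, name) pairs
theorem pv_fold_eq (clothes : List (List String)) :
    clothes.foldl (fun d cloth =>
      if d.contains (PySem.List.pyGetD cloth 1 "") then
        d.insert (PySem.List.pyGetD cloth 1 "")
          (d.getD (PySem.List.pyGetD cloth 1 "") [] ++ [PySem.List.pyGetD cloth 0 ""])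
      else
        d.insert (PySem.List.pyGetD cloth 1 "") [PySem.List.pyGetD cloth 0 ""]) PySem.Dict.empty
    = (clothes.map (fun c => (PySem.List.pyGetD c 1 "", PySem.List.pyGetD c 0 ""))).foldl
        (fun d p => d.modify p.1 [] (fun v => v ++ [p.2])) PySem.Dict.empty := by
  rw [List.foldl_map]
  exact PySem.List.foldl_congr_mem _ _ _ _ (fun d c _ => (pv_step_eq d c).symm) |>.symm

theorem pv_keys_fold (clothes : List (List String)) :
    ((clothes.map (fun c => (PySem.List.pyGetD c 1 "", PySem.List.pyGetD c 0 ""))).foldl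
        (fun d p => d.modify p.1 [] (fun v => v ++ [p.2])) PySem.Dict.empty).keys
    = PySem.Set.ofList (clothes.map (fun c => PySem.List.pyGetD c 1 "")) := by
  have h1 := PySem.Dict.keys_foldl_modify_key
    (l := clothes.map (fun c => (PySem.List.pyGetD c 1 "", PySem.List.pyGetD c 0 "")))
    (key := Prod.fst) (d0 := ([] : List String))
    (f := fun _ p => fun v => v ++ [p.2]) (d := PySem.Dict.empty)
  simpa [PySem.Dict.keys_empty, PySem.Set.update_nil_left, List.map_map, Function.comp] using h1

theorem pv_nodup_keys_fold (clothes : List (List String)) :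
    ((clothes.map (fun c => (PySem.List.pyGetD c 1 "", PySem.List.pyGetD c 0 ""))).foldl
        (fun d p => d.modify p.1 [] (fun v => v ++ [p.2])) PySem.Dict.empty).keys.Nodup := by
  exact PySem.Dict.nodup_keys_foldl_modify_key
    (clothes.map (fun c => (PySem.List.pyGetD c 1 "", PySem.List.pyGetD c 0 "")))
    Prod.fst ([] : List String) (fun _ p => fun v => v ++ [p.2]) PySem.Dict.empty
    (by simp [PySem.Dict.keys_empty])

-- the group stored under category k holds one name per occurrence of k
theorem pv_getD_fold (clothes : List (List String)) (k : String) :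
    ((clothes.map (fun c => (PySem.List.pyGetD c 1 "", PySem.List.pyGetD c 0 ""))).foldl
        (fun d p => d.modify p.1 [] (fun v => v ++ [p.2])) PySem.Dict.empty).getD k []
    = ((clothes.map (fun c => (PySem.List.pyGetD c 1 "", PySem.List.pyGetD c 0 ""))).filter
        (fun p => p.1 == k)).map (fun p => p.2) := by
  have h1 := PySem.Dict.getD_foldl_modify_append
    (clothes.map (fun c => (PySem.List.pyGetD c 1 "", PySem.List.pyGetD c 0 "")))
    PySem.Dict.empty k
  simpa [PySem.Dict.getD_empty] using h1

theorem pv_group_length (clothes : List (List String)) (k : String) :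
    ((((clothes.map (fun c => (PySem.List.pyGetD c 1 "", PySem.List.pyGetD c 0 ""))).filter
        (fun p => p.1 == k)).map (fun p => p.2)).length : Int)
    = ((clothes.map (fun c => PySem.List.pyGetD c 1 "")).count k : Int) := by
  simp [← List.countP_eq_length_filter, List.countP_map, List.count]
  exact List.countP_congr (fun c _ => Iff.rfl)

-- foldl of multiplication = product of the mapped list
theorem pv_foldl_mul_prod (l : List String) (f : String → Int) : ∀ (a : Int),
    l.foldl (fun a k => a * f k) a = a * (l.map f).prod := by
  induction l with
  | nil => intro a; simp
  | cons c t ih => intro a; simp [ih, mul_assoc]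

-- A's answer is the product, over the distinct categories, of each category's multiplicity
theorem pv_A_char (clothes : List (List String)) :
    solution clothes
    = ((PySem.Set.ofList (clothes.map (fun c => PySem.List.pyGetD c 1 ""))).map
        (fun k => ((clothes.map (fun c => PySem.List.pyGetD c 1 "")).count k : Int))).prod - 1 := by
  simp only [solution]
  rw [pv_fold_eq]
  rw [PySem.Dict.values_eq_map_keys _ (pv_nodup_keys_fold clothes) ([] : List String)]
  rw [List.foldl_map, pv_keys_fold]
  refine congrArg (fun x => x - 1) ?_
  rw [pv_foldl_mul_prod _ _ 1, one_mul]
  refine congrArg List.prod (List.map_congr_left (fun k _ => ?_))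
  rw [pv_getD_fold]
  exact pv_group_length clothes k

------------------------------------------------------------------- B side

-- the product of category multiplicities (proof-side abbreviation)
def pvProdCounts (l : List String) : Int := ∏ k ∈ l.toFinset, (l.count k : Int)

-- peeling one category off the product
theorem pv_peel (c : String) (t : List String) :
    pvProdCounts (c :: t)
    = (1 + (t.count c : Int)) * pvProdCounts (t.filter (fun x => !(x == c))) := by
  unfold pvProdCounts
  have hmem : c ∈ (c :: t).toFinset := by simp
  rw [← Finset.mul_prod_erase _ _ hmem]
  have hset : (t.filter (fun x => !(x == c))).toFinset = ((c :: t).toFinset).erase c := by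
    ext k
    simp only [List.toFinset_filter, Finset.mem_filter, List.mem_toFinset, Finset.mem_erase,
      List.mem_cons, ne_eq, Bool.not_eq_eq_eq_not, Bool.not_true, beq_eq_false_iff_ne]
    constructor
    · rintro ⟨hk, hne⟩; exact ⟨hne, Or.inr hk⟩
    · rintro ⟨hne, h | hk⟩
      · exact absurd h hne
      · exact ⟨hk, hne⟩
  rw [hset]
  congr 1
  · push_cast [List.count_cons_self]; ring
  · refine Finset.prod_congr rfl (fun k hk => ?_)
    have hkc : k ≠ c := (Finset.mem_erase.mp hk).1
    congr 1
    rw [List.count_filter (by simp [hkc])]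
    rw [List.count_cons, if_neg (by exact fun h => hkc (beq_iff_eq.mp h).symm), Nat.add_zero]

-- the final 'if run: answer *= run' of B
def pvFinish (s : Int × Int × Option String) : Int := if s.2.1 ≠ 0 then s.1 * s.2.1 else s.1

-- B's scan invariant: inside a run of p, with all remaining keys ≥ p (the list is sorted)
theorem pv_scan_inv (l : List String) : ∀ (p : String) (run answer : Int),
    l.Pairwise (· ≤ ·) → (∀ x ∈ l, p ≤ x) → 1 ≤ run →
    pvFinish (l.foldl (fun (s : Int × Int × Option String) cat =>
        if some cat == s.2.2 then (s.1, s.2.1 + 1, s.2.2)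
        else ((if s.2.1 ≠ 0 then s.1 * s.2.1 else s.1), 1, some cat)) (answer, run, some p))
    = answer * (run + (l.count p : Int)) * pvProdCounts (l.filter (fun x => !(x == p))) := by
  induction l with
  | nil =>
    intro p run answer _ _ hrun
    simp only [List.foldl_nil, pvFinish]
    rw [if_pos (by omega : run ≠ (0:Int))]
    simp [pvProdCounts]
  | cons c t ih =>
    intro p run answer hs hge hrun
    rcases List.pairwise_cons.mp hs with ⟨hct, hst⟩
    by_cases hcp : c = p
    · subst hcp
      rw [List.foldl_cons, if_pos (by simp)]
      rw [ih c (run + 1) answer hst hct (by omega)]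
      simp only [List.count_cons_self, List.filter_cons, beq_self_eq_true, Bool.not_true]
      push_cast
      ring
    · have hpc : p < c := lt_of_le_of_ne (hge c (List.mem_cons_self)) (fun h => hcp h.symm)
      rw [List.foldl_cons, if_neg (by simp [hcp])]
      rw [show (if run ≠ (0:Int) then answer * run else answer) = answer * run from
        if_pos (by omega)]
      rw [ih c 1 (answer * run) hst hct le_rfl]
      have hnotp : ∀ x ∈ c :: t, ¬ (x = p) := by
        intro x hx
        rcases List.mem_cons.mp hx with h | h
        · subst h; exact fun h' => absurd h' hcp
        · exact fun h' => absurd (h' ▸ lt_of_lt_of_le hpc (hct x h)) (lt_irrefl _)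
      have hcount : (c :: t).count p = 0 := by
        rw [List.count_eq_zero]
        exact fun h => hnotp p h rfl
      have hfilter : (c :: t).filter (fun x => !(x == p)) = c :: t := by
        apply List.filter_eq_self.mpr
        intro x hx
        simp [hnotp x hx]
      rw [hcount, hfilter, pv_peel]
      push_cast
      ring

-- B's whole scan over a sorted list computes the product of multiplicities
theorem pv_scan_top (l : List String) (hs : l.Pairwise (· ≤ ·)) :
    pvFinish (l.foldl (fun (s : Int × Int × Option String) cat =>
        if some cat == s.2.2 then (s.1, s.2.1 + 1, s.2.2)
        else ((if s.2.1 ≠ 0 then s.1 * s.2.1 else s.1), 1, some cat)) (1, 0, none))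
    = pvProdCounts l := by
  cases l with
  | nil => simp [pvFinish, pvProdCounts]
  | cons c t =>
    rcases List.pairwise_cons.mp hs with ⟨hct, hst⟩
    rw [List.foldl_cons, if_neg (by simp)]
    rw [show (if (0:Int) ≠ 0 then (1:Int) * 0 else 1) = 1 from if_neg (by omega)]
    rw [pv_scan_inv t c 1 1 hst hct le_rfl, pv_peel]
    ring

-- product over a nodup enumeration of the distinct elements = Finset product
theorem pv_ofList_prod (l : List String) (f : String → Int) :
    ((PySem.Set.ofList l).map f).prod = ∏ k ∈ l.toFinset, f k := by
  rw [← List.prod_toFinset f (PySem.Set.nodup_ofList l)]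
  refine Finset.prod_congr ?_ (fun _ _ => rfl)
  ext k
  simp [PySem.Set.mem_ofList]

-- ===== VERDICT (by name: the statement is the Claim_ definition above) =====
theorem solution_spec : Claim_equal_solution := by
  intro clothes _ _
  unfold Spec_solution
  set cats0 := clothes.map (fun c => PySem.List.pyGetD c 1 "") with hcats0
  have hA := pv_A_char clothes
  rw [← hcats0] at hA
  rw [hA]
  simp only [solution_alt, ← hcats0]
  set cats := PySem.List.sorted cats0 (fun x => x) false with hcats
  have hperm : cats.Perm cats0 := PySem.List.sorted_perm cats0 (fun x => x) false
  have hsorted : cats.Pairwise (· ≤ ·) := by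
    have := PySem.List.sorted_pairwise cats0 (fun x => x)
    simpa using this
  have htop := pv_scan_top cats hsorted
  unfold pvFinish at htop
  rw [htop]
  rw [pv_ofList_prod]
  unfold pvProdCounts
  rw [List.toFinset_eq_of_perm cats cats0 hperm]
  refine congrArg (fun x => x - 1) ?_
  exact Finset.prod_congr rfl (fun k _ => by rw [hperm.count_eq])
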